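-- pv_equiv track=rewrite | github.com/danielabramiani/GOA | my work/python/recources/.py | solve
-- ===== SOURCE A (Python) =====
-- def solve(s):
--     chars = [c for c in s if c != ' ']
--     chars.reverse()
--
--     result = []
--
--     char_iter = iter(chars)
--
--     for c in s:
--         if c == ' ':
--             result.append(' ')
--         else:
--             result.append(next(char_iter))
--
--     return ''.join(result)
-- ===== SOURCE B (Python) =====
-- def solve(s):
--     a = list(s)
--     left, right = 0, len(a) - 1
--     while left < right:
--         if a[left] == ' ':
--             left += 1
--         elif a[right] == ' ':
--             right -= 1
--         else:
--             a[left], a[right] = a[right], a[left]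
--             left += 1
--             right -= 1
--     return ''.join(a)
-- ===== Notes on version B (the rewrite author's own statement) =====
-- stated objective: alternative
-- what changed: Replaced filter-reverse-and-refill (three passes building new lists and consuming an iterator) by an in-place two-pointer swap that skips spaces and swaps non-space characters from both ends.
import Mathlib
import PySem

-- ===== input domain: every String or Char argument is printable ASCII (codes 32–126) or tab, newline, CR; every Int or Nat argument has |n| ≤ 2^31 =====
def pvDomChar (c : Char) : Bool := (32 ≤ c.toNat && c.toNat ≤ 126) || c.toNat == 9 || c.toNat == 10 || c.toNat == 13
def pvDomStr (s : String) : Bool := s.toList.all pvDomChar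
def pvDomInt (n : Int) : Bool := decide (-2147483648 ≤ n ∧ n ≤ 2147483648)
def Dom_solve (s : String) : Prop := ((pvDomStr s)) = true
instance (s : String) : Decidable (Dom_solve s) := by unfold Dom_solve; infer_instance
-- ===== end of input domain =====

-- B replaces A's filter/reverse/refill passes by an in-place two-pointer swap that skips
-- spaces and swaps non-space characters from both ends (alternative algorithm, same cost).

-- ===== PORT A =====
-- the 'for c in s' loop of A, consuming the iterator over the reversed non-space chars;
-- the `[] => []` arm is Python's `next` on an exhausted iterator, unreachable here
def solveFill : List Char → List Char → List Char
  | [], _ => []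
  | c :: cs, it =>
    if c = ' ' then ' ' :: solveFill cs it
    else
      match it with
      | [] => []
      | x :: xs => x :: solveFill cs xs

def solve (s : String) : String :=
  let chars := (s.toList.filter (fun c => c != ' ')).reverse
  String.ofList (solveFill s.toList chars)

-- ===== PORT B =====
-- the while-loop of B: two indices moving inward over the character list
def solveLoop (a : List Char) (l r : Nat) : List Char :=
  if l < r then
    if a.getD l ' ' = ' ' then solveLoop a (l + 1) r
    else if a.getD r ' ' = ' ' then solveLoop a l (r - 1)
    else
      solveLoop ((a.set l (a.getD r ' ')).set r (a.getD l ' ')) (l + 1) (r - 1)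
  else a
termination_by r - l
decreasing_by all_goals omega

def solve_alt (s : String) : String :=
  let a := s.toList
  String.ofList (solveLoop a 0 (a.length - 1))

-- ===== PRECONDITION & SPEC =====
def Spec_solve (s : String) (out : String) : Prop := out = solve_alt s
instance (s : String) (out : String) : Decidable (Spec_solve s out) := by unfold Spec_solve; infer_instance

-- ===== CLAIM (what is proved, stated in full; the proofs are below) =====
def Claim_equal_solve : Prop := ∀ (s : String), Dom_solve s → Spec_solve s (solve s)

-- ===== LEMMAS AND PROOFS =====

-- proof-side specification: reverse the non-space characters of a list in place,
-- peeling characters from both ends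
def revNS : List Char → List Char
  | [] => []
  | x :: xs =>
    if x = ' ' then ' ' :: revNS xs
    else if hx : xs = [] then [x]
    else if xs.getLast hx = ' ' then revNS (x :: xs.dropLast) ++ [' ']
    else xs.getLast hx :: (revNS xs.dropLast ++ [x])
termination_by l => l.length
decreasing_by
  all_goals simp [List.length_dropLast]
  all_goals cases xs with
  | nil => exact absurd rfl hx
  | cons a as => simp

-- "t has spaces exactly where s has"
def SpaceShape (s t : List Char) : Prop :=
  List.Forall₂ (fun a b => a = ' ' ↔ b = ' ') s t

theorem revNS_shape (l : List Char) : SpaceShape l (revNS l) := by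
  induction l using revNS.induct with
  | case1 => rw [revNS]; exact List.Forall₂.nil
  | case2 xs ih =>
      rw [revNS, if_pos rfl]
      exact List.Forall₂.cons (by simp) ih
  | case3 x hx =>
      rw [revNS, if_neg hx, dif_pos rfl]
      exact List.Forall₂.cons (by simp [hx]) List.Forall₂.nil
  | case4 x xs hx h hl ih =>
      rw [revNS, if_neg hx, dif_neg h, if_pos hl]
      have hdec : x :: xs = (x :: xs.dropLast) ++ [xs.getLast h] := by
        simp [List.dropLast_append_getLast h]
      rw [hdec]
      exact List.rel_append ih (List.Forall₂.cons (by simp [hl]) List.Forall₂.nil)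
  | case5 x xs hx h hl ih =>
      rw [revNS, if_neg hx, dif_neg h, if_neg hl]
      have hdec : x :: xs = x :: (xs.dropLast ++ [xs.getLast h]) := by
        simp [List.dropLast_append_getLast h]
      rw [hdec]
      exact List.Forall₂.cons (by simp [hx, hl])
        (List.rel_append ih (List.Forall₂.cons (by simp [hx, hl]) List.Forall₂.nil))

theorem revNS_filter (l : List Char) :
    (revNS l).filter (fun c => c != ' ') = (l.filter (fun c => c != ' ')).reverse := by
  induction l using revNS.induct with
  | case1 => simp [revNS]
  | case2 xs ih => rw [revNS, if_pos rfl]; simpa using ih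
  | case3 x hx => rw [revNS, if_neg hx, dif_pos rfl]; simp [hx]
  | case4 x xs hx h hl ih =>
      rw [revNS, if_neg hx, dif_neg h, if_pos hl]
      conv_rhs => rw [show x :: xs = (x :: xs.dropLast) ++ [xs.getLast h] by
        simp [List.dropLast_append_getLast h]]
      simp [List.filter_append, hl, ih]
      simp [List.filter_append, hx]
  | case5 x xs hx h hl ih =>
      rw [revNS, if_neg hx, dif_neg h, if_neg hl]
      conv_rhs => rw [show x :: xs = x :: (xs.dropLast ++ [xs.getLast h]) by
        simp [List.dropLast_append_getLast h]]
      simp [List.filter_append, hx, hl, ih]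

theorem shape_filter_unique {s t₁ t₂ : List Char}
    (h₁ : SpaceShape s t₁) (h₂ : SpaceShape s t₂)
    (hf : t₁.filter (fun c => c != ' ') = t₂.filter (fun c => c != ' ')) : t₁ = t₂ := by
  induction h₁ generalizing t₂ with
  | nil => cases h₂; rfl
  | cons hab h ih =>
      cases h₂ with
      | cons hac h' =>
          rename_i a b l₁ l₂ c l₃
          by_cases ha : a = ' '
          · have hb : b = ' ' := hab.mp ha
            have hc : c = ' ' := hac.mp ha
            subst hb; subst hc
            simp only [List.filter_cons] at hf
            simp at hf
            exact congrArg _ (ih h' hf)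
          · have hb : b ≠ ' ' := fun hb => ha (hab.mpr hb)
            have hc : c ≠ ' ' := fun hc => ha (hac.mpr hc)
            simp [hb, hc] at hf
            obtain ⟨rfl, hf⟩ := hf
            exact congrArg _ (ih h' hf)

theorem solveFill_space (cs it : List Char) :
    solveFill (' ' :: cs) it = ' ' :: solveFill cs it := by
  rw [solveFill.eq_def]; simp

theorem solveFill_ns_cons (c x : Char) (cs xs : List Char) (hc : c ≠ ' ') :
    solveFill (c :: cs) (x :: xs) = x :: solveFill cs xs := by
  rw [solveFill.eq_def]; simp [hc]

theorem fill_spec (s : List Char) :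
    ∀ it : List Char, it.length = (s.filter (fun c => c != ' ')).length →
    (∀ x ∈ it, x ≠ ' ') →
    SpaceShape s (solveFill s it) ∧ (solveFill s it).filter (fun c => c != ' ') = it := by
  induction s with
  | nil =>
      intro it hlen _
      simp at hlen
      subst hlen
      exact ⟨List.Forall₂.nil, rfl⟩
  | cons c cs ih =>
      intro it hlen hns
      by_cases hc : c = ' '
      · have := ih it (by simpa [List.filter_cons, hc] using hlen) hns
        subst hc
        rw [solveFill_space]
        exact ⟨List.Forall₂.cons (by simp) this.1, by simpa using this.2⟩
      · cases it with
        | nil => simp [hc] at hlen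
        | cons x xs =>
            rw [solveFill_ns_cons c x cs xs hc]
            have hx : x ≠ ' ' := hns x (by simp)
            have := ih xs (by simpa [List.filter_cons, hc] using hlen)
              (fun y hy => hns y (by simp [hy]))
            exact ⟨List.Forall₂.cons (by simp [hc, hx]) this.1,
              by simp [hx, this.2]⟩

theorem solveFill_eq_revNS (l : List Char) :
    solveFill l ((l.filter (fun c => c != ' ')).reverse) = revNS l := by
  have hf := fill_spec l ((l.filter (fun c => c != ' ')).reverse) (by simp)
    (by intro x hx; simp at hx; exact hx.2)
  exact shape_filter_unique hf.1 (revNS_shape l) (by rw [hf.2, revNS_filter])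

theorem getD_concat (pre suf : List Char) (c : Char) :
    (pre ++ c :: suf).getD pre.length ' ' = c := by
  induction pre with
  | nil => simp
  | cons a as => simp

theorem set_concat (pre suf : List Char) (c v : Char) :
    (pre ++ c :: suf).set pre.length v = pre ++ v :: suf := by
  induction pre with
  | nil => simp
  | cons a as => simp

theorem revNS_short (l : List Char) (h : l.length ≤ 1) : revNS l = l := by
  match l with
  | [] => rw [revNS]
  | [c] =>
      by_cases hc : c = ' '
      · subst hc; rw [revNS, if_pos rfl, revNS]
      · rw [revNS, if_neg hc, dif_pos rfl]
  | a :: b :: t => simp at h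

theorem revNS_head_space (xs : List Char) : revNS (' ' :: xs) = ' ' :: revNS xs := by
  rw [revNS, if_pos rfl]

theorem revNS_last_space (b : Char) (q : List Char) (hb : b ≠ ' ') :
    revNS (b :: (q ++ [' '])) = revNS (b :: q) ++ [' '] := by
  have hq : q ++ [' '] ≠ [] := by simp
  rw [revNS, if_neg hb, dif_neg hq, if_pos (by simp), List.dropLast_concat]

theorem revNS_swap (b e : Char) (q : List Char) (hb : b ≠ ' ') (he : e ≠ ' ') :
    revNS (b :: (q ++ [e])) = e :: (revNS q ++ [b]) := by
  have hq : q ++ [e] ≠ [] := by simp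
  rw [revNS, if_neg hb, dif_neg hq]
  simp only [List.getLast_concat, List.dropLast_concat]
  rw [if_neg he]

theorem loop_spec : ∀ (n : Nat) (mid pre post : List Char), mid.length = n →
    solveLoop (pre ++ mid ++ post) pre.length (pre.length + mid.length - 1)
      = pre ++ revNS mid ++ post := by
  intro n
  induction n using Nat.strong_induction_on with
  | _ n ih =>
  intro mid pre post hn
  by_cases hlen : mid.length ≤ 1
  · rw [solveLoop.eq_def, if_neg (by omega), revNS_short mid hlen]
  · obtain ⟨b, mid', rfl⟩ : ∃ b m', mid = b :: m' := by
      cases mid with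
      | nil => simp at hlen
      | cons b m' => exact ⟨b, m', rfl⟩
    have hm' : mid' ≠ [] := by intro h; subst h; simp at hlen
    obtain ⟨q, e, rfl⟩ : ∃ q e, mid' = q ++ [e] :=
      ⟨mid'.dropLast, mid'.getLast hm', (List.dropLast_append_getLast hm').symm⟩
    have hguard : pre.length < pre.length + (b :: (q ++ [e])).length - 1 := by
      simp
    have hgl : (pre ++ (b :: (q ++ [e])) ++ post).getD pre.length ' ' = b := by
      rw [show pre ++ (b :: (q ++ [e])) ++ post = pre ++ b :: (q ++ e :: post) by simp,
        getD_concat]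
    have hgr : (pre ++ (b :: (q ++ [e])) ++ post).getD
        (pre.length + (b :: (q ++ [e])).length - 1) ' ' = e := by
      rw [show pre.length + (b :: (q ++ [e])).length - 1 = (pre ++ b :: q).length by
          simp,
        show pre ++ (b :: (q ++ [e])) ++ post = (pre ++ b :: q) ++ e :: post by simp,
        getD_concat]
    rw [solveLoop.eq_def, if_pos hguard, hgl, hgr]
    by_cases hb : b = ' '
    · rw [if_pos hb]
      subst hb
      have key := ih (q ++ [e]).length (by subst hn; simp) (q ++ [e]) (pre ++ [' ']) post rfl
      rw [show pre.length + (' ' :: (q ++ [e])).length - 1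
            = (pre ++ [' ']).length + (q ++ [e]).length - 1 by simp; omega,
        show pre.length + 1 = (pre ++ [' ']).length by simp,
        show pre ++ ' ' :: (q ++ [e]) ++ post = (pre ++ [' ']) ++ (q ++ [e]) ++ post by simp,
        key, revNS_head_space]
      simp
    · rw [if_neg hb]
      by_cases he : e = ' '
      · rw [if_pos he]
        subst he
        have key := ih (b :: q).length (by subst hn; simp) (b :: q) pre (' ' :: post) rfl
        rw [show pre.length + (b :: (q ++ [' '])).length - 1 - 1
              = pre.length + (b :: q).length - 1 by simp,
          show pre ++ b :: (q ++ [' ']) ++ post = pre ++ (b :: q) ++ ' ' :: post by simp,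
          key, revNS_last_space b q hb]
        simp
      · rw [if_neg he]
        have hset : ((pre ++ (b :: (q ++ [e])) ++ post).set pre.length e).set
            (pre.length + (b :: (q ++ [e])).length - 1) b
            = (pre ++ [e]) ++ q ++ (b :: post) := by
          rw [show pre ++ (b :: (q ++ [e])) ++ post = pre ++ b :: (q ++ e :: post) by simp,
            set_concat,
            show pre.length + (b :: (q ++ [e])).length - 1 = (pre ++ e :: q).length by
              simp,
            show pre ++ e :: (q ++ e :: post) = (pre ++ e :: q) ++ e :: post by simp,
            set_concat]
          simp
        have key := ih q.length (by subst hn; simp) q (pre ++ [e]) (b :: post) rfl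
        rw [hset,
          show pre.length + (b :: (q ++ [e])).length - 1 - 1
            = (pre ++ [e]).length + q.length - 1 by simp,
          show pre.length + 1 = (pre ++ [e]).length by simp,
          key, revNS_swap b e q hb he]
        simp

theorem solveLoop_eq_revNS (l : List Char) :
    solveLoop l 0 (l.length - 1) = revNS l := by
  simpa using loop_spec l.length l [] [] rfl

-- ===== VERDICT (by name: the statement is the Claim_ definition above) =====
theorem solve_spec : Claim_equal_solve := by
  intro s _
  unfold Spec_solve solve solve_alt
  show String.ofList (solveFill s.toList ((s.toList.filter (fun c => c != ' ')).reverse))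
      = String.ofList (solveLoop s.toList 0 (s.toList.length - 1))
  rw [solveFill_eq_revNS, solveLoop_eq_revNS]
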